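-- pv_equiv track=rewrite | github.com/toantran980/Project-1-Sorting-Algorithms-and-Visualizer | output.py | merge_sort_visual
-- ===== SOURCE A (Python) =====
-- def merge_sort_visual(arr):
--     steps = []
--
--     def merge_sort_helper(arr):
--         if len(arr) > 1:
--             mid = len(arr) // 2
--             left_half = arr[:mid]
--             right_half = arr[mid:]
--
--             merge_sort_helper(left_half)
--             merge_sort_helper(right_half)
--
--             i = j = k = 0
--
--             while i < len(left_half) and j < len(right_half):
--                 if left_half[i] < right_half[j]:
--                     arr[k] = left_half[i]
--                     i += 1
--                 else:
--                     arr[k] = right_half[j]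
--                     j += 1
--                 k += 1
--
--             while i < len(left_half):
--                 arr[k] = left_half[i]
--                 i += 1
--                 k += 1
--
--             while j < len(right_half):
--                 arr[k] = right_half[j]
--                 j += 1
--                 k += 1
--
--             steps.append(arr.copy())
--
--     merge_sort_helper(arr)
--     return steps
-- ===== SOURCE B (Python) =====
-- def merge_sort_visual(arr):
--     # Iterative merge sort: an explicit LIFO stack of frames replaces the
--     # recursive helper; frames are merged in the recursion's post-order, and
--     # the top frame is the caller's list, so arr is sorted in place like A.
--     steps = []
--     stack = [(arr, None, None)]
--     while stack:
--         a, left, right = stack.pop()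
--         if left is None:
--             if len(a) > 1:
--                 mid = len(a) // 2
--                 l, r = a[:mid], a[mid:]
--                 stack.append((a, l, r))
--                 stack.append((r, None, None))
--                 stack.append((l, None, None))
--         else:
--             merged = []
--             i = j = 0
--             nl, nr = len(left), len(right)
--             while i < nl and j < nr:
--                 if left[i] < right[j]:
--                     merged.append(left[i])
--                     i += 1
--                 else:
--                     merged.append(right[j])
--                     j += 1
--             if i < nl:
--                 merged.extend(left[i:])
--             else:
--                 merged.extend(right[j:])
--             a[:] = merged
--             steps.append(merged)
--     return steps
-- ===== Notes on version B (the rewrite author's own statement) =====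
-- stated objective: alternative
-- what changed: Replaces the recursive nested helper with an explicit LIFO stack of frames driven in post-order, so the merges (and snapshot appends) happen iteratively in exactly the recursion's order.
import Mathlib
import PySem

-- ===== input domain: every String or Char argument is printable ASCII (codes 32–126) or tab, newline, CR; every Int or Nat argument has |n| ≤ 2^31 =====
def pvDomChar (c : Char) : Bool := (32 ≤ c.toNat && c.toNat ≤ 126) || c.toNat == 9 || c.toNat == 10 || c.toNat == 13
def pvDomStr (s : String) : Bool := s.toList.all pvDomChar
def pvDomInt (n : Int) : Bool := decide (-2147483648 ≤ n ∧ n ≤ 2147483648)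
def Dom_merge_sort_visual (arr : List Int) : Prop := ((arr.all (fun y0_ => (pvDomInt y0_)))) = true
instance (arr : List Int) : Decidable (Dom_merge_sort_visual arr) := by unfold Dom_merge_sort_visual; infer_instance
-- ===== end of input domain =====

-- B replaces A's recursive helper by an explicit LIFO frame stack driven in post-order
-- (objective: alternative decomposition, similar cost). Both Pythons sort the caller's
-- list in place identically; the theorems here are about the returned snapshot list.
-- Both ports use a fuel parameter only as a totality guard (fuel is proved sufficient below).

-- ===== PORT A =====
-- The three while loops write left_half/right_half into arr[0..]; since together they
-- overwrite all of arr, the final contents are exactly this structural merge.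
def msvMergeA : List Int → List Int → List Int
  | [], r => r
  | x :: l, [] => x :: l
  | x :: l, y :: r => if x < y then x :: msvMergeA l (y :: r) else y :: msvMergeA (x :: l) r

-- merge_sort_helper mutates arr and appends to steps; modeled as returning
-- (final contents of arr, snapshots appended).  Fuel arr.length suffices (proved below).
def msvHelper : Nat → List Int → List Int × List (List Int)
  | 0, arr => (arr, [])
  | fuel + 1, arr =>
      if 1 < arr.length then
        let mid := arr.length / 2
        let pl := msvHelper fuel (arr.take mid)   -- arr[:mid]
        let pr := msvHelper fuel (arr.drop mid)   -- arr[mid:]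
        let m := msvMergeA pl.1 pr.1
        (m, pl.2 ++ pr.2 ++ [m])
      else (arr, [])

def merge_sort_visual (arr : List Int) : List (List Int) := (msvHelper arr.length arr).2

-- ===== PORT B =====
-- Same in-place merge phase as Source B's merge branch (main loop plus tail extend).
def msvMergeB : List Int → List Int → List Int
  | [], r => r
  | x :: l, [] => x :: l
  | x :: l, y :: r => if x < y then x :: msvMergeB l (y :: r) else y :: msvMergeB (x :: l) r

-- A frame is an unexpanded task or a pending merge; in Source B results travel through
-- the shared mutable child lists, modeled here by an explicit value stack.
inductive MsvFrame
  | task : List Int → MsvFrame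
  | merge : MsvFrame
deriving Repr

-- The while loop over the frame stack; one fuel unit per iteration (enough is proved below).
def msvRun : Nat → List MsvFrame → List (List Int) → List (List Int) → List (List Int)
  | 0, _, _, steps => steps
  | _ + 1, [], _, steps => steps
  | fuel + 1, .task xs :: fs, vals, steps =>
      if 1 < xs.length then
        let mid := xs.length / 2
        msvRun fuel (.task (xs.take mid) :: .task (xs.drop mid) :: .merge :: fs) vals steps
      else msvRun fuel fs (xs :: vals) steps
  | fuel + 1, .merge :: fs, r :: l :: vals, steps =>
      let m := msvMergeB l r
      msvRun fuel fs (m :: vals) (steps ++ [m])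
  | _ + 1, .merge :: _, _, steps => steps   -- unreachable: a merge frame has its two child results

def merge_sort_visual_alt (arr : List Int) : List (List Int) :=
  msvRun (4 * arr.length + 4) [.task arr] [] []

-- ===== PRECONDITION & SPEC =====
def Spec_merge_sort_visual (arr : List Int) (out : List (List Int)) : Prop := out = merge_sort_visual_alt arr
instance (arr : List Int) (out : List (List Int)) : Decidable (Spec_merge_sort_visual arr out) := by unfold Spec_merge_sort_visual; infer_instance

-- ===== CLAIM (what is proved, stated in full; the proofs are below) =====
def Claim_equal_merge_sort_visual : Prop := ∀ (arr : List Int), Dom_merge_sort_visual arr → Spec_merge_sort_visual arr (merge_sort_visual arr)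

-- ===== LEMMAS AND PROOFS =====

-- fuel-free reference recursion (proof-only)
def msvSpec (arr : List Int) : List Int × List (List Int) :=
  if 1 < arr.length then
    let mid := arr.length / 2
    let pl := msvSpec (arr.take mid)
    let pr := msvSpec (arr.drop mid)
    let m := msvMergeA pl.1 pr.1
    (m, pl.2 ++ pr.2 ++ [m])
  else (arr, [])
termination_by arr.length
decreasing_by all_goals simp; omega

-- number of stack iterations spent on a task frame (proof-only)
def msvCost (arr : List Int) : Nat :=
  if 1 < arr.length then
    msvCost (arr.take (arr.length / 2)) + msvCost (arr.drop (arr.length / 2)) + 2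
  else 1
termination_by arr.length
decreasing_by all_goals simp; omega

theorem msvCost_le (xs : List Int) : msvCost xs ≤ max 1 (4 * xs.length - 2) := by
  by_cases h : 1 < xs.length
  · have hl := msvCost_le (xs.take (xs.length / 2))
    have hr := msvCost_le (xs.drop (xs.length / 2))
    rw [msvCost, if_pos h]
    simp only [List.length_take, List.length_drop] at hl hr ⊢
    omega
  · rw [msvCost, if_neg h]
    omega
termination_by xs.length
decreasing_by all_goals simp; omega

theorem msvMerge_eq (l r : List Int) : msvMergeB l r = msvMergeA l r := by
  induction l generalizing r with
  | nil => cases r <;> simp [msvMergeA, msvMergeB]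
  | cons x l ih =>
      induction r with
      | nil => simp [msvMergeA, msvMergeB]
      | cons y r ihr =>
          simp only [msvMergeA, msvMergeB]
          split
          · rw [ih]
          · rw [ihr]

-- with enough fuel, A's helper computes the reference recursion
theorem msvHelper_spec (f : Nat) (xs : List Int) (h : xs.length ≤ f) :
    msvHelper f xs = msvSpec xs := by
  induction f generalizing xs with
  | zero =>
      have : xs = [] := List.eq_nil_of_length_eq_zero (by omega)
      subst this
      rw [msvHelper, msvSpec]
      simp
  | succ f ih =>
      by_cases h1 : 1 < xs.length
      · rw [msvHelper, msvSpec, if_pos h1, if_pos h1]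
        have e1 := ih (xs.take (xs.length / 2)) (by simp; omega)
        have e2 := ih (xs.drop (xs.length / 2)) (by simp; omega)
        simp only [e1, e2]
      · rw [msvHelper, msvSpec, if_neg h1, if_neg h1]

-- processing one task frame consumes msvCost fuel, pushes its sorted result and
-- appends its snapshots — exactly the reference recursion's post-order
theorem msvRun_task (f : Nat) (xs : List Int) (fs : List MsvFrame)
    (vals steps : List (List Int)) (h : msvCost xs ≤ f) :
    msvRun f (.task xs :: fs) vals steps
      = msvRun (f - msvCost xs) fs ((msvSpec xs).1 :: vals) (steps ++ (msvSpec xs).2) := by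
  by_cases h1 : 1 < xs.length
  · have hc : msvCost xs = msvCost (xs.take (xs.length / 2)) + msvCost (xs.drop (xs.length / 2)) + 2 := by
      rw [msvCost, if_pos h1]
    have hcl : 1 ≤ msvCost (xs.take (xs.length / 2)) := by
      rw [msvCost]; split <;> omega
    have hcr : 1 ≤ msvCost (xs.drop (xs.length / 2)) := by
      rw [msvCost]; split <;> omega
    obtain ⟨f', rfl⟩ : ∃ f', f = f' + 1 := ⟨f - 1, by omega⟩
    rw [show msvRun (f' + 1) (.task xs :: fs) vals steps
          = msvRun f' (.task (xs.take (xs.length / 2)) :: .task (xs.drop (xs.length / 2)) :: .merge :: fs) vals steps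
        from by rw [msvRun]; simp [h1]]
    rw [msvRun_task f' (xs.take (xs.length / 2)) _ _ _ (by omega)]
    rw [msvRun_task (f' - msvCost (xs.take (xs.length / 2))) (xs.drop (xs.length / 2)) _ _ _ (by omega)]
    obtain ⟨g, hg⟩ : ∃ g, f' - msvCost (xs.take (xs.length / 2)) - msvCost (xs.drop (xs.length / 2)) = g + 1 :=
      ⟨f' - msvCost (xs.take (xs.length / 2)) - msvCost (xs.drop (xs.length / 2)) - 1, by omega⟩
    rw [hg, msvRun]
    conv_rhs => rw [msvSpec, if_pos h1]
    simp only [msvMerge_eq]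
    have : g = f' + 1 - msvCost xs := by omega
    rw [this]
    simp
  · have hc : msvCost xs = 1 := by rw [msvCost, if_neg h1]
    obtain ⟨f', rfl⟩ : ∃ f', f = f' + 1 := ⟨f - 1, by omega⟩
    rw [show msvRun (f' + 1) (.task xs :: fs) vals steps = msvRun f' fs (xs :: vals) steps
        from by rw [msvRun]; simp [h1]]
    conv_rhs => rw [msvSpec, if_neg h1]
    simp [hc]
termination_by f
decreasing_by all_goals omega

theorem msvRun_nil (f : Nat) (vals steps : List (List Int)) : msvRun f [] vals steps = steps := by
  cases f <;> rw [msvRun]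

-- ===== VERDICT (by name: the statement is the Claim_ definition above) =====
theorem merge_sort_visual_spec : Claim_equal_merge_sort_visual := by
  intro arr _
  show merge_sort_visual arr = merge_sort_visual_alt arr
  rw [merge_sort_visual, merge_sort_visual_alt, msvHelper_spec _ _ (le_refl _)]
  rw [msvRun_task _ _ _ _ _ (by have := msvCost_le arr; omega), msvRun_nil]
  simp
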